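-- pv_equiv track=rewrite | github.com/VkumarStack/LeetCode | gas_station.py | findLongestGasGain
-- ===== SOURCE A (Python) =====
-- def findLongestGasGain(gas, cost) -> int:
--     bestIndex = -1
--     currentIndex = -1
--     bestLength = 0
--     startBestLength = 0
--     for i in range(len(gas)):
--         if gas[i] - cost[i] >= 0:
--             if currentIndex == -1:
--                 currentIndex = i
--         elif currentIndex != -1:
--             if currentIndex == 0:
--                 startBestLength = (i - currentIndex)
--             if (i - currentIndex) >= bestLength:
--                 bestLength = i - currentIndex
--                 bestIndex = currentIndex
--             currentIndex = -1
--
--     if currentIndex != -1: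
--         if (len(gas) - currentIndex) + startBestLength >= bestLength:
--             bestIndex = currentIndex
--
--     return bestIndex
-- ===== SOURCE B (Python) =====
-- # Right-to-left suffix DP: r[i] = length of the non-negative run starting at i,
-- # then select the best closed run by a lexicographic max (length, then start,
-- # matching the original's ">=" tie-break) and test the run reaching the end.
-- def findLongestGasGain(gas, cost) -> int:
--     n = len(gas)
--     rrev = [0]
--     for g, c in reversed(list(zip(gas, cost))):
--         rrev.append(rrev[-1] + 1 if g - c >= 0 else 0)
--     r = rrev[::-1]          # r[i] = run length starting at i, r[n] = 0
--
--     bestLen, bestIdx = max(((r[i], i) for i in range(n)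
--                             if r[i] > 0 and (i == 0 or r[i - 1] == 0) and i + r[i] < n),
--                            default=(0, -1))
--     if n > 0 and r[n - 1] > 0:                            # a run reaches the end
--         t = next(i for i in range(n) if i + r[i] == n)    # its start
--         startLen = r[0] if r[0] < n else 0                # closed run at index 0
--         if (n - t) + startLen >= bestLen:
--             bestIdx = t
--     return bestIdx
-- ===== Notes on version B (the rewrite author's own statement) =====
-- stated objective: alternative
-- what changed: Replaced A's stateful left-to-right scan (four mutable scalars tracking the current/best run) by a right-to-left suffix DP r[i] = length of the non-negative run starting at i, followed by a lexicographic max over closed run starts and a direct test of the run reaching the end.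
import Mathlib
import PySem

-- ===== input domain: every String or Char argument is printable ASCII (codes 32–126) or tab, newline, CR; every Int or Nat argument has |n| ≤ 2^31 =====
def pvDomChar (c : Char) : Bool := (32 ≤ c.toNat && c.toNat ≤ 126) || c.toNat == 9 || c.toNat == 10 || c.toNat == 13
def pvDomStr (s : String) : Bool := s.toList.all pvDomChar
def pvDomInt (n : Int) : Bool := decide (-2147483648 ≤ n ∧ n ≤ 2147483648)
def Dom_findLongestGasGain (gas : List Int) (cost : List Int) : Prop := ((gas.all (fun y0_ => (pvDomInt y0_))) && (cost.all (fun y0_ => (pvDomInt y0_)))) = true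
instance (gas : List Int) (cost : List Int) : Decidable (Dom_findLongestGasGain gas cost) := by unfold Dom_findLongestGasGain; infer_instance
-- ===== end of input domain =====

-- B replaces A's stateful left-to-right scan by a right-to-left suffix DP (r[i] = length of the
-- non-negative run starting at i) plus a lexicographic-max selection; same O(n) cost, same index proved.


-- ===== PORT A =====
def findLongestGasGain (gas : List Int) (cost : List Int) : Int :=
  let st :=
    (PySem.List.pyRange 0 (gas.length : Int) 1).foldl
      (fun (st : Int × Int × Int × Int) i =>
        -- gas[i], cost[i]: i is in range for both lists on every input admitted by Pre_, so getD is exact there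
        let g := PySem.List.pyGetD gas i 0
        let c := PySem.List.pyGetD cost i 0
        if g - c ≥ 0 then
          if st.2.1 = -1 then (st.1, i, st.2.2.1, st.2.2.2) else st
        else
          if st.2.1 ≠ -1 then
            let sbl := if st.2.1 = 0 then i - st.2.1 else st.2.2.2
            if i - st.2.1 ≥ st.2.2.1 then (st.2.1, -1, i - st.2.1, sbl)
            else (st.1, -1, st.2.2.1, sbl)
          else st)
      (-1, -1, 0, 0)
  if st.2.1 ≠ -1 then
    if ((gas.length : Int) - st.2.1) + st.2.2.2 ≥ st.2.2.1 then st.2.1 else st.1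
  else st.1

-- ===== PORT B =====
def findLongestGasGain_alt (gas : List Int) (cost : List Int) : Int :=
  let n : Int := (gas.length : Int)
  -- rrev.append(...): suffix run lengths of reversed(list(zip(gas, cost))); rrev[-1] via pyGetD (rrev is never empty)
  let rrev := ((gas.zip cost).reverse).foldl
      (fun (r : List Int) p => r ++ [if p.1 - p.2 ≥ 0 then PySem.List.pyGetD r (-1) 0 + 1 else 0]) [0]
  -- r = rrev[::-1]  (slice? with step -1 is never none)
  let r := (PySem.List.slice? rrev none none (-1)).getD []
  -- max((r[i], i) for i in range(n) if ...), default=(0, -1)): a running maximum with a strict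
  -- lexicographic comparison keeps the first maximal pair, exactly Python's max; the tuple
  -- components are compared explicitly ('<' on Lean pairs is not Python's lexicographic order)
  let best :=
    ((PySem.List.pyRange 0 n 1).filter (fun i =>
        decide (PySem.List.pyGetD r i 0 > 0 ∧ (i = 0 ∨ PySem.List.pyGetD r (i - 1) 0 = 0)
          ∧ i + PySem.List.pyGetD r i 0 < n))).foldl
      (fun (b : Int × Int) i =>
        if PySem.List.pyGetD r i 0 > b.1 ∨ (PySem.List.pyGetD r i 0 = b.1 ∧ i > b.2)
        then (PySem.List.pyGetD r i 0, i) else b) (0, -1)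
  if n > 0 ∧ PySem.List.pyGetD r (n - 1) 0 > 0 then
    -- next(i for i in range(n) if i + r[i] == n): first such index; under the guard i = n-1
    -- qualifies, so find? is some and the default is never used
    let t := ((PySem.List.pyRange 0 n 1).find? (fun i => i + PySem.List.pyGetD r i 0 == n)).getD 0
    let startLen := if PySem.List.pyGetD r 0 0 < n then PySem.List.pyGetD r 0 0 else 0
    if (n - t) + startLen ≥ best.1 then t else best.2
  else best.2

-- ===== PRECONDITION & SPEC =====
-- Pre_ excludes exactly the inputs where A raises IndexError (cost shorter than gas).
def Pre_findLongestGasGain (gas : List Int) (cost : List Int) : Prop :=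
  gas.length ≤ cost.length
instance (gas : List Int) (cost : List Int) : Decidable (Pre_findLongestGasGain gas cost) := by
  unfold Pre_findLongestGasGain; infer_instance

def pvWitness_findLongestGasGain : List Int × List Int := ([1, 0, 2], [0, 1, 1])

def Spec_findLongestGasGain (gas : List Int) (cost : List Int) (out : Int) : Prop := out = findLongestGasGain_alt gas cost
instance (gas : List Int) (cost : List Int) (out : Int) : Decidable (Spec_findLongestGasGain gas cost out) := by unfold Spec_findLongestGasGain; infer_instance

-- ===== CLAIM (what is proved, stated in full; the proofs are below) =====
def Claim_equal_findLongestGasGain : Prop := ∀ (gas : List Int) (cost : List Int), Dom_findLongestGasGain gas cost → Pre_findLongestGasGain gas cost → Spec_findLongestGasGain gas cost (findLongestGasGain gas cost)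

-- ===== LEMMAS AND PROOFS =====

-- A's loop body, abstracted over the values it reads at index i
def stepA (st : Int × Int × Int × Int) (i g c : Int) : Int × Int × Int × Int :=
  if g - c ≥ 0 then
    if st.2.1 = -1 then (st.1, i, st.2.2.1, st.2.2.2) else st
  else
    if st.2.1 ≠ -1 then
      let sbl := if st.2.1 = 0 then i - st.2.1 else st.2.2.2
      if i - st.2.1 ≥ st.2.2.1 then (st.2.1, -1, i - st.2.1, sbl)
      else (st.1, -1, st.2.2.1, sbl)
    else st

-- intermediate run-list machine (proof-only hub between the two ports)
def stepB (acc : List (Int × Int) × Option Int) (p : Int × (Int × Int)) :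
    List (Int × Int) × Option Int :=
  if p.2.1 - p.2.2 ≥ 0 then
    match acc.2 with
    | none => (acc.1, some p.1)
    | some _ => acc
  else
    match acc.2 with
    | some s => (acc.1 ++ [(s, p.1 - s)], none)
    | none => acc

def selStep (b : Int × Int) (r : Int × Int) : Int × Int :=
  if r.2 ≥ b.2 then (r.1, r.2) else b

def zeroRunLen (runs : List (Int × Int)) : Int :=
  ((runs.find? (fun r => r.1 == 0)).map (fun r => r.2)).getD 0

def finalA (n : Int) (st : Int × Int × Int × Int) : Int :=
  if st.2.1 ≠ -1 then
    if (n - st.2.1) + st.2.2.2 ≥ st.2.2.1 then st.2.1 else st.1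
  else st.1

def finalB (n : Int) (rs : List (Int × Int) × Option Int) : Int :=
  match rs.2 with
  | none => (rs.1.foldl selStep (-1, 0)).1
  | some s =>
    if (n - s) + zeroRunLen rs.1 ≥ (rs.1.foldl selStep (-1, 0)).2 then s
    else (rs.1.foldl selStep (-1, 0)).1

-- encoding of the run machine's Option start as A's currentIndex
def pvEnc : Option Int → Int
  | none => -1
  | some x => x

-- B-side recursive specifications
def pvCond (p : Int × Int) : Bool := decide (p.1 - p.2 ≥ 0)

def pvR (ps : List (Int × Int)) : List Int :=
  ps.foldr (fun p r => (if p.1 - p.2 ≥ 0 then r.headD 0 + 1 else 0) :: r) [0]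

def pvLead : List (Int × Int) → Nat
  | [] => 0
  | p :: tl => if pvCond p then pvLead tl + 1 else 0

def pvRuns : List (Int × Int) → Bool → List (Nat × Nat)
  | [], _ => []
  | p :: tl, prev =>
      (if pvCond p ∧ prev = false ∧ pvLead tl < tl.length then [(0, pvLead tl + 1)] else [])
        ++ (pvRuns tl (pvCond p)).map (fun q => (q.1 + 1, q.2))

def pvTrail : List (Int × Int) → Option Nat
  | [] => none
  | p :: tl => if pvCond p ∧ pvLead tl = tl.length then some 0 else (pvTrail tl).map (· + 1)

theorem zeroRunLen_append_ne (runs : List (Int × Int)) (x v : Int) (hx : x ≠ 0) :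
    zeroRunLen (runs ++ [(x, v)]) = zeroRunLen runs := by
  unfold zeroRunLen
  rw [List.find?_append]
  cases h : runs.find? (fun r => r.1 == 0) with
  | none =>
    have hb : (x == 0) = false := by simpa using hx
    simp [List.find?, hb]
  | some r => simp

-- bridge: A's pyRange/indexing loop is the fold of stepA over the enumerated zip list
theorem bridgeA (gas cost : List Int) (h : gas.length ≤ cost.length)
    (init : Int × Int × Int × Int) :
    (PySem.List.pyRange 0 (gas.length : Int) 1).foldl
      (fun st i => stepA st i (PySem.List.pyGetD gas i 0) (PySem.List.pyGetD cost i 0)) init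
    = (PySem.List.enumerate (gas.zip cost) 0).foldl (fun st p => stepA st p.1 p.2.1 p.2.2) init := by
  have hlen : (gas.zip cost).length = gas.length := by
    simp [List.length_zip]; omega
  rw [PySem.List.enumerate_eq_map_pyRange (gas.zip cost) ((0 : Int), (0 : Int)),
      List.foldl_map]
  have hlen2 : PySem.List.len (gas.zip cost) = (gas.length : Int) := by
    simp [hlen]
  rw [hlen2]
  apply PySem.List.foldl_congr_mem
  intro st i hi
  have hi' := (PySem.List.mem_pyRange_one).1 hi
  have h0 : (0 : Int) ≤ i := hi'.1
  have hlt : i.toNat < gas.length := by omega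
  have hltc : i.toNat < cost.length := by omega
  have hz : i.toNat < (gas.zip cost).length := by omega
  rw [PySem.List.pyGetD_of_nonneg _ _ h0, PySem.List.pyGetD_of_nonneg _ _ h0,
      PySem.List.pyGetD_of_nonneg _ _ h0]
  simp [List.getD_eq_getElem?_getD, hlt, hltc, List.getElem_zip]

-- main A-side invariant: A's abstract loop and the run machine run in parallel
theorem inv_loop (l : List (Int × Int)) :
    ∀ (s bi bl sbl : Int) (runs : List (Int × Int)) (start : Option Int),
    0 ≤ s →
    (∀ x, start = some x → 0 ≤ x) →
    (start = some 0 → runs = []) →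
    (runs ≠ [] → 0 < s) →
    (bi, bl) = runs.foldl selStep (-1, 0) →
    sbl = zeroRunLen runs →
    (let rA := (PySem.List.enumerate l s).foldl (fun st p => stepA st p.1 p.2.1 p.2.2)
                 (bi, pvEnc start, bl, sbl)
     let rB := (PySem.List.enumerate l s).foldl stepB (runs, start)
     rA.1 = (rB.1.foldl selStep (-1, 0)).1 ∧
     rA.2.1 = pvEnc rB.2 ∧
     rA.2.2.1 = (rB.1.foldl selStep (-1, 0)).2 ∧
     rA.2.2.2 = zeroRunLen rB.1 ∧
     (∀ x, rB.2 = some x → 0 ≤ x)) := by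
  induction l with
  | nil =>
    intro s bi bl sbl runs start hs hpos h0 hne hsel hz
    rw [PySem.List.enumerate_nil]
    simp only [List.foldl_nil]
    exact ⟨by rw [← hsel], by trivial, by rw [← hsel], hz, hpos⟩
  | cons p l ih =>
    intro s bi bl sbl runs start hs hpos h0 hne hsel hz
    rw [PySem.List.enumerate_cons]
    simp only [List.foldl_cons]
    by_cases hd : p.1 - p.2 ≥ 0
    · cases start with
      | none =>
        have hA : stepA (bi, pvEnc none, bl, sbl) (s, p).1 (s, p).2.1 (s, p).2.2
            = (bi, s, bl, sbl) := by
          simp only [stepA, pvEnc]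
          rw [if_pos hd]
          simp
        have hB : stepB (runs, none) (s, p) = (runs, some s) := by
          simp only [stepB]
          rw [if_pos hd]
        rw [hA, hB]
        have hr0 : some (s : Int) = some 0 → runs = [] := by
          intro hx
          by_cases hr : runs = []
          · exact hr
          · exact absurd (hne hr) (by cases hx; omega)
        exact ih (s + 1) bi bl sbl runs (some s) (by omega)
          (by intro x hx; cases hx; omega) hr0 (by intro _; omega) hsel hz
      | some x =>
        have hx0 : (0 : Int) ≤ x := hpos x rfl
        have hA : stepA (bi, pvEnc (some x), bl, sbl) (s, p).1 (s, p).2.1 (s, p).2.2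
            = (bi, x, bl, sbl) := by
          simp only [stepA, pvEnc]
          rw [if_pos hd, if_neg (show ¬ x = -1 by omega)]
        have hB : stepB (runs, some x) (s, p) = (runs, some x) := by
          simp only [stepB]
          rw [if_pos hd]
        rw [hA, hB]
        exact ih (s + 1) bi bl sbl runs (some x) (by omega) hpos h0
          (by intro _; omega) hsel hz
    · cases start with
      | none =>
        have hA : stepA (bi, pvEnc none, bl, sbl) (s, p).1 (s, p).2.1 (s, p).2.2
            = (bi, -1, bl, sbl) := by
          simp only [stepA, pvEnc]
          rw [if_neg hd]
          simp
        have hB : stepB (runs, none) (s, p) = (runs, none) := by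
          simp only [stepB]
          rw [if_neg hd]
        rw [hA, hB]
        exact ih (s + 1) bi bl sbl runs none (by omega) hpos h0
          (by intro _; omega) hsel hz
      | some x =>
        have hx0 : (0 : Int) ≤ x := hpos x rfl
        have hB : stepB (runs, some x) (s, p) = (runs ++ [(x, s - x)], none) := by
          simp only [stepB]
          rw [if_neg hd]
        have hsel' : (runs ++ [(x, s - x)]).foldl selStep (-1, 0)
            = selStep (bi, bl) (x, s - x) := by
          rw [List.foldl_append, ← hsel]
          rfl
        have hzl' : (if x = 0 then s - x else sbl) = zeroRunLen (runs ++ [(x, s - x)]) := by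
          by_cases hx : x = 0
          · subst hx
            rw [h0 rfl, if_pos rfl]
            simp [zeroRunLen]
          · rw [zeroRunLen_append_ne _ _ _ hx, if_neg hx, hz]
        have hA : stepA (bi, pvEnc (some x), bl, sbl) (s, p).1 (s, p).2.1 (s, p).2.2
            = ((selStep (bi, bl) (x, s - x)).1, -1, (selStep (bi, bl) (x, s - x)).2,
               if x = 0 then s - x else sbl) := by
          simp only [stepA, pvEnc, selStep]
          rw [if_neg hd, if_pos (show x ≠ -1 by omega)]
          split_ifs <;> rfl
        rw [hA, hB]
        exact ih (s + 1) (selStep (bi, bl) (x, s - x)).1 (selStep (bi, bl) (x, s - x)).2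
          (if x = 0 then s - x else sbl) (runs ++ [(x, s - x)]) none (by omega)
          (by intro _ hx; cases hx) (by intro hx; cases hx)
          (by intro _; omega) (by rw [hsel']) hzl'

-- A equals the run machine's final value
theorem A_eq_finalB (gas cost : List Int) (h : gas.length ≤ cost.length) :
    findLongestGasGain gas cost
      = finalB (gas.length : Int)
          ((PySem.List.enumerate (gas.zip cost) 0).foldl stepB ([], none)) := by
  have h1 : findLongestGasGain gas cost
      = finalA (gas.length : Int)
          ((PySem.List.pyRange 0 (gas.length : Int) 1).foldl
            (fun st i => stepA st i (PySem.List.pyGetD gas i 0) (PySem.List.pyGetD cost i 0))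
            (-1, -1, 0, 0)) := rfl
  have hinv := inv_loop (gas.zip cost) 0 (-1) 0 0 [] none (le_refl 0)
    (by intro x hx; cases hx) (by intro hx; cases hx) (by intro hx; exact absurd rfl hx)
    rfl rfl
  simp only [pvEnc] at hinv
  obtain ⟨e1, e2, e3, e4, e5⟩ := hinv
  rw [h1, bridgeA gas cost h]
  unfold finalA finalB
  cases hst : ((PySem.List.enumerate (gas.zip cost) 0).foldl stepB ([], none)).2 with
  | none =>
    rw [hst] at e2
    simp only [pvEnc] at e2
    rw [if_neg (by omega)]
    exact e1
  | some x =>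
    rw [hst] at e2 e5
    simp only [pvEnc] at e2
    have hx0 : (0 : Int) ≤ x := e5 x rfl
    rw [if_pos (show _ ≠ (-1 : Int) by omega), e2, e3, e4, e1]

-- ===== B-side specification lemmas =====

theorem pvR_headD (ps : List (Int × Int)) : (pvR ps).headD 0 = (pvLead ps : Int) := by
  induction ps with
  | nil => rfl
  | cons p tl ih =>
    show ((if p.1 - p.2 ≥ 0 then (pvR tl).headD 0 + 1 else 0) :: pvR tl).headD 0 = _
    rw [List.headD_cons]
    by_cases h : p.1 - p.2 ≥ 0
    · have hc : pvCond p = true := by simp only [pvCond]; exact decide_eq_true h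
      rw [if_pos h, ih]; simp [pvLead, hc]
    · have hc : pvCond p = false := by simp only [pvCond]; exact decide_eq_false h
      rw [if_neg h]; simp [pvLead, hc]

theorem pvR_cons (p : Int × Int) (ps : List (Int × Int)) :
    pvR (p :: ps) = (if pvCond p then (pvLead ps : Int) + 1 else 0) :: pvR ps := by
  show (if p.1 - p.2 ≥ 0 then (pvR ps).headD 0 + 1 else 0) :: pvR ps = _
  rw [pvR_headD]
  by_cases h : p.1 - p.2 ≥ 0
  · have hc : pvCond p = true := by simp only [pvCond]; exact decide_eq_true h
    rw [if_pos h, if_pos hc]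
  · have hc : pvCond p = false := by simp only [pvCond]; exact decide_eq_false h
    rw [if_neg h, if_neg (by simp [hc])]

theorem pvR_getD (ps : List (Int × Int)) : ∀ k, (pvR ps).getD k 0 = (pvLead (ps.drop k) : Int) := by
  induction ps with
  | nil => intro k; cases k <;> simp [pvR, pvLead, List.getD]
  | cons p tl ih =>
    intro k
    cases k with
    | zero =>
      rw [pvR_cons]
      by_cases h : pvCond p <;> simp [pvLead, h]
    | succ k =>
      rw [pvR_cons]
      simpa using ih k

theorem pvLead_le (ps : List (Int × Int)) : pvLead ps ≤ ps.length := by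
  induction ps with
  | nil => simp [pvLead]
  | cons p tl ih =>
    by_cases h : pvCond p <;> simp [pvLead, h] <;> omega

theorem pvR_ne_nil (ps : List (Int × Int)) : pvR ps ≠ [] := by
  cases ps with
  | nil => simp [pvR]
  | cons p tl => rw [pvR_cons]; simp

-- rrev is the reversed suffix list
theorem buildRRev_eq (ps : List (Int × Int)) :
    ps.reverse.foldl
      (fun (r : List Int) p => r ++ [if p.1 - p.2 ≥ 0 then PySem.List.pyGetD r (-1) 0 + 1 else 0]) [0]
    = (pvR ps).reverse := by
  induction ps with
  | nil => rfl
  | cons p tl ih =>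
    rw [List.reverse_cons, List.foldl_append, ih, List.foldl_cons, List.foldl_nil]
    have hne : (pvR tl).reverse ≠ [] := by simpa using pvR_ne_nil tl
    rw [PySem.List.pyGetD_neg_one _ _ hne, List.getLast_reverse]
    have hd : ∀ (l : List Int) (h : l ≠ []), l.headD 0 = l.head h := by
      intro l h
      cases l with
      | nil => exact absurd rfl h
      | cons a t => rfl
    have hh : (pvR tl).head (pvR_ne_nil tl) = (pvLead tl : Int) := by
      rw [← hd _ (pvR_ne_nil tl)]; exact pvR_headD tl
    rw [hh, pvR_cons]
    by_cases h : p.1 - p.2 ≥ 0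
    · have hc : pvCond p = true := by simp only [pvCond]; exact decide_eq_true h
      rw [if_pos h, if_pos hc, List.reverse_cons]
    · have hc : pvCond p = false := by simp only [pvCond]; exact decide_eq_false h
      rw [if_neg h, if_neg (by simp [hc]), List.reverse_cons]

theorem pv_map_shift (L : List (Nat × Nat)) (s : Int) :
    (L.map (fun q => (q.1 + 1, q.2))).map (fun q : Nat × Nat => (s + (q.1 : Int), (q.2 : Int)))
      = L.map (fun q : Nat × Nat => (s + 1 + (q.1 : Int), (q.2 : Int))) := by
  rw [List.map_map]
  apply List.map_congr_left
  intro q _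
  simp [Prod.ext_iff]
  push_cast
  ring

theorem pv_trail_shift (o : Option Nat) (s : Int) :
    Option.map (fun k : Nat => s + (k : Int)) (Option.map (· + 1) o)
      = Option.map (fun k : Nat => s + 1 + (k : Int)) o := by
  cases o with
  | none => rfl
  | some k => simp; push_cast; ring

theorem foldB_char (ps : List (Int × Int)) : ∀ (s : Int) (runs0 : List (Int × Int)),
    ((PySem.List.enumerate ps s).foldl stepB (runs0, none)
        = (runs0 ++ (pvRuns ps false).map (fun q => (s + (q.1 : Int), (q.2 : Int))),
           Option.map (fun k : Nat => s + (k : Int)) (pvTrail ps)))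
    ∧ (∀ x, (PySem.List.enumerate ps s).foldl stepB (runs0, some x)
        = (runs0 ++ (if pvLead ps = ps.length then [] else [(x, s + (pvLead ps : Int) - x)])
                ++ (pvRuns ps true).map (fun q => (s + (q.1 : Int), (q.2 : Int))),
           if pvLead ps = ps.length then some x
           else Option.map (fun k : Nat => s + (k : Int)) (pvTrail ps))) := by
  induction ps with
  | nil =>
    intro s runs0
    constructor
    · rw [PySem.List.enumerate_nil]; simp [pvRuns, pvTrail]
    · intro x; rw [PySem.List.enumerate_nil]; simp [pvRuns, pvTrail, pvLead]
  | cons p tl ih =>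
    intro s runs0
    by_cases hc : p.1 - p.2 ≥ 0
    · have hcb : pvCond p = true := by simp only [pvCond]; exact decide_eq_true hc
      have hlead : pvLead (p :: tl) = pvLead tl + 1 := by simp [pvLead, hcb]
      constructor
      · -- open a run at s
        rw [PySem.List.enumerate_cons, List.foldl_cons]
        have hstep : stepB (runs0, none) (s, p) = (runs0, some s) := by
          simp only [stepB]; rw [if_pos hc]
        rw [hstep, (ih (s + 1) runs0).2 s]
        by_cases hlen : pvLead tl = tl.length
        · have hrun : pvRuns (p :: tl) false
              = (pvRuns tl true).map (fun q => (q.1 + 1, q.2)) := by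
            simp [pvRuns, hcb, hlen]
          have htr : pvTrail (p :: tl) = some 0 := by
            simp [pvTrail, hcb, hlen]
          rw [hrun, htr, pv_map_shift, if_pos hlen]
          simp [hlen]
        · have hlt : pvLead tl < tl.length := lt_of_le_of_ne (pvLead_le tl) hlen
          have hrun : pvRuns (p :: tl) false
              = (0, pvLead tl + 1) :: (pvRuns tl true).map (fun q => (q.1 + 1, q.2)) := by
            simp [pvRuns, hcb, hlt]
          have htr : pvTrail (p :: tl) = (pvTrail tl).map (· + 1) := by
            simp [pvTrail, hcb, hlen]
          rw [hrun, htr, if_neg hlen, pv_trail_shift]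
          simp only [List.map_cons, pv_map_shift]
          rw [Prod.ext_iff]
          refine ⟨?_, by simp [hlen]⟩
          simp [List.append_assoc]
          try push_cast
          try ring
          try omega
      · -- continue the open run
        intro x
        rw [PySem.List.enumerate_cons, List.foldl_cons]
        have hstep : stepB (runs0, some x) (s, p) = (runs0, some x) := by
          simp only [stepB]; rw [if_pos hc]
        rw [hstep, (ih (s + 1) runs0).2 x]
        have hrun : pvRuns (p :: tl) true
            = (pvRuns tl true).map (fun q => (q.1 + 1, q.2)) := by
          simp [pvRuns, hcb]
        have hleneq : (pvLead (p :: tl) = (p :: tl).length) ↔ (pvLead tl = tl.length) := by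
          simp [hlead]
        by_cases hlen : pvLead tl = tl.length
        · rw [if_pos hlen, if_pos (hleneq.2 hlen), if_pos (hleneq.2 hlen),
              hrun, pv_map_shift]
          simp [hlen]
        · have htr : pvTrail (p :: tl) = (pvTrail tl).map (· + 1) := by
            simp [pvTrail, hcb, hlen]
          rw [if_neg hlen, if_neg (fun h => hlen (hleneq.1 h)),
              if_neg (fun h => hlen (hleneq.1 h)), hrun, pv_map_shift, htr, pv_trail_shift]
          rw [Prod.ext_iff]
          refine ⟨?_, by simp [hlen]⟩
          simp [List.append_assoc, hlead]
          try push_cast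
          try ring
          try omega
    · have hcb : pvCond p = false := by simp only [pvCond]; exact decide_eq_false hc
      have hlead : pvLead (p :: tl) = 0 := by simp [pvLead, hcb]
      have hrunT : pvRuns (p :: tl) true
          = (pvRuns tl false).map (fun q => (q.1 + 1, q.2)) := by
        simp [pvRuns, hcb]
      have hrunF : pvRuns (p :: tl) false
          = (pvRuns tl false).map (fun q => (q.1 + 1, q.2)) := by
        simp [pvRuns, hcb]
      have htr : pvTrail (p :: tl) = (pvTrail tl).map (· + 1) := by
        simp [pvTrail, hcb]
      have hlen : ¬ (pvLead (p :: tl) = (p :: tl).length) := by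
        simp [hlead]
      constructor
      · rw [PySem.List.enumerate_cons, List.foldl_cons]
        have hstep : stepB (runs0, none) (s, p) = (runs0, none) := by
          simp only [stepB]; rw [if_neg hc]
        rw [hstep, (ih (s + 1) runs0).1, hrunF, pv_map_shift, htr, pv_trail_shift]
      · intro x
        rw [PySem.List.enumerate_cons, List.foldl_cons]
        have hstep : stepB (runs0, some x) (s, p) = (runs0 ++ [(x, s - x)], none) := by
          simp only [stepB]; rw [if_neg hc]
        rw [hstep, (ih (s + 1) (runs0 ++ [(x, s - x)])).1, hrunT, pv_map_shift, htr,
            pv_trail_shift, if_neg hlen, if_neg hlen]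
        rw [Prod.ext_iff]
        refine ⟨?_, rfl⟩
        simp [List.append_assoc, hlead]

-- closed-run-start test, as B's filter reads it from the suffix array
def pvQ (ps : List (Int × Int)) (prev : Bool) (k : Nat) : Bool :=
  decide (0 < pvLead (ps.drop k)
    ∧ (if k = 0 then prev = false else pvLead (ps.drop (k - 1)) = 0)
    ∧ k + pvLead (ps.drop k) < ps.length)

theorem pvQ_succ (p : Int × Int) (tl : List (Int × Int)) (prev : Bool) (k : Nat) :
    pvQ (p :: tl) prev (k + 1) = pvQ tl (pvCond p) k := by
  unfold pvQ
  rw [decide_eq_decide]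
  cases k with
  | zero =>
    by_cases hc : pvCond p <;> simp [pvLead, hc] <;> omega
  | succ j =>
    simp only [List.drop_succ_cons, List.length_cons, Nat.add_sub_cancel]
    constructor
    · rintro ⟨h1, h2, h3⟩
      exact ⟨h1, by simpa using h2, by omega⟩
    · rintro ⟨h1, h2, h3⟩
      exact ⟨h1, by simpa using h2, by omega⟩

theorem candChar (ps : List (Int × Int)) : ∀ prev,
    ((List.range ps.length).filter (pvQ ps prev)).map
        (fun k => (k, pvLead (ps.drop k)))
      = pvRuns ps prev := by
  induction ps with
  | nil => intro prev; simp [pvRuns]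
  | cons p tl ih =>
    intro prev
    have hq0 : (pvQ (p :: tl) prev 0 = true)
        ↔ (pvCond p = true ∧ prev = false ∧ pvLead tl < tl.length) := by
      unfold pvQ
      by_cases hc : pvCond p <;> simp [pvLead, hc] <;> omega
    rw [show (p :: tl).length = tl.length + 1 from rfl, List.range_succ_eq_map,
        List.filter_cons, List.filter_map]
    have hfc : (List.range tl.length).filter (pvQ (p :: tl) prev ∘ Nat.succ)
        = (List.range tl.length).filter (pvQ tl (pvCond p)) := by
      apply List.filter_congr
      intro k _
      exact pvQ_succ p tl prev k
    rw [hfc]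
    by_cases h0 : pvQ (p :: tl) prev 0
    · rw [if_pos h0]
      obtain ⟨hc, hprev, hlt⟩ := hq0.1 h0
      have hrun : pvRuns (p :: tl) prev
          = (0, pvLead tl + 1) :: (pvRuns tl (pvCond p)).map (fun q => (q.1 + 1, q.2)) := by
        simp [pvRuns, hc, hprev, hlt]
      rw [hrun, List.map_cons, List.map_map, ← ih (pvCond p), List.map_map]
      congr 1
      · show (0, pvLead (p :: tl)) = (0, pvLead tl + 1)
        simp [pvLead, hc]
    · rw [if_neg h0]
      have hcond : ¬ (pvCond p = true ∧ prev = false ∧ pvLead tl < tl.length) :=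
        fun hcc => h0 (hq0.2 hcc)
      have hrun : pvRuns (p :: tl) prev
          = (pvRuns tl (pvCond p)).map (fun q => (q.1 + 1, q.2)) := by
        simp only [pvRuns]
        rw [if_neg hcond]
        simp
      rw [hrun, List.map_map, ← ih (pvCond p), List.map_map]
      apply List.map_congr_left
      intro k _
      simp [Function.comp]

theorem pvRuns_pairwise (ps : List (Int × Int)) : ∀ prev,
    (pvRuns ps prev).Pairwise (fun a b : Nat × Nat => a.1 < b.1) := by
  induction ps with
  | nil => intro prev; simp [pvRuns]
  | cons p tl ih =>
    intro prev
    show ((if pvCond p ∧ prev = false ∧ pvLead tl < tl.length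
            then [(0, pvLead tl + 1)] else [])
        ++ (pvRuns tl (pvCond p)).map (fun q : Nat × Nat => (q.1 + 1, q.2))).Pairwise _
    rw [List.pairwise_append]
    refine ⟨?_, ?_, ?_⟩
    · split_ifs <;> simp
    · exact List.pairwise_map.2 ((ih (pvCond p)).imp (by intro a b h; omega))
    · intro a ha b hb
      split_ifs at ha with hco
      · simp at ha
        subst ha
        simp [List.mem_map] at hb
        obtain ⟨c, d, _, rfl⟩ := hb
        simp
      · simp at ha

theorem sel_lex : ∀ (L : List (Nat × Nat)) (bi bl : Int),
    (∀ q ∈ L, bi < (q.1 : Int)) →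
    L.Pairwise (fun a b : Nat × Nat => a.1 < b.1) →
    (L.map (fun q : Nat × Nat => ((q.1 : Int), (q.2 : Int)))).foldl selStep (bi, bl)
      = Prod.swap ((L.map (fun q : Nat × Nat => ((q.2 : Int), (q.1 : Int)))).foldl
          (fun b c => if c.1 > b.1 ∨ (c.1 = b.1 ∧ c.2 > b.2) then c else b) (bl, bi)) := by
  intro L
  induction L with
  | nil => intro bi bl _ _; rfl
  | cons q L ih =>
    intro bi bl hbi hpw
    have hq1 : bi < (q.1 : Int) := hbi q (by simp)
    obtain ⟨hhead, htail⟩ := List.pairwise_cons.1 hpw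
    simp only [List.map_cons, List.foldl_cons]
    by_cases h : (q.2 : Int) ≥ bl
    · rw [show selStep (bi, bl) ((q.1 : Int), (q.2 : Int))
            = if (q.2 : Int) ≥ bl then ((q.1 : Int), (q.2 : Int)) else (bi, bl) from rfl,
          if_pos h, if_pos (by omega :
            ((q.2 : Int), (q.1 : Int)).1 > (bl, bi).1
              ∨ (((q.2 : Int), (q.1 : Int)).1 = (bl, bi).1
                  ∧ ((q.2 : Int), (q.1 : Int)).2 > (bl, bi).2))]
      exact ih (q.1 : Int) (q.2 : Int)
        (fun r hr => by exact_mod_cast Int.ofNat_lt.2 (hhead r hr)) htail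
    · rw [show selStep (bi, bl) ((q.1 : Int), (q.2 : Int))
            = if (q.2 : Int) ≥ bl then ((q.1 : Int), (q.2 : Int)) else (bi, bl) from rfl,
          if_neg h, if_neg (by omega :
            ¬ (((q.2 : Int), (q.1 : Int)).1 > (bl, bi).1
              ∨ (((q.2 : Int), (q.1 : Int)).1 = (bl, bi).1
                  ∧ ((q.2 : Int), (q.1 : Int)).2 > (bl, bi).2)))]
      exact ih bi bl (fun r hr => hbi r (by simp [hr])) htail

theorem pvLead_full_drop (ps : List (Int × Int)) :
    pvLead ps = ps.length → ∀ k, pvLead (ps.drop k) = (ps.drop k).length := by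
  induction ps with
  | nil => intro _ k; simp [pvLead]
  | cons p tl ih =>
    intro h k
    have hc : pvCond p = true ∧ pvLead tl = tl.length := by
      by_cases hc : pvCond p
      · refine ⟨hc, ?_⟩
        simp [pvLead, hc] at h
        omega
      · exfalso
        simp [pvLead, hc] at h
    cases k with
    | zero => simpa using h
    | succ j => simpa using ih hc.2 j

theorem pvTrail_isSome_iff (ps : List (Int × Int)) :
    (pvTrail ps).isSome = true ↔ 0 < pvLead (ps.drop (ps.length - 1)) := by
  induction ps with
  | nil => simp [pvTrail, pvLead]
  | cons p tl ih =>
    cases tl with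
    | nil => by_cases hc : pvCond p <;> simp [pvTrail, pvLead, hc]
    | cons t ts =>
      have hlen : 1 ≤ (t :: ts).length := by simp
      have hd : (p :: t :: ts).drop ((p :: t :: ts).length - 1)
          = (t :: ts).drop ((t :: ts).length - 1) := by
        have h1 : (p :: t :: ts).length - 1 = ((t :: ts).length - 1) + 1 := by
          simp
        rw [h1, List.drop_succ_cons]
      rw [hd]
      by_cases hcnd : (pvCond p = true ∧ pvLead (t :: ts) = (t :: ts).length)
      · have hT : pvTrail (p :: t :: ts) = some 0 := by
          simp [pvTrail, hcnd.1, hcnd.2]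
        have hlead : pvLead ((t :: ts).drop ((t :: ts).length - 1))
            = ((t :: ts).drop ((t :: ts).length - 1)).length :=
          pvLead_full_drop _ hcnd.2 _
        rw [hT, hlead]
        simp [List.length_drop]
      · have hT : pvTrail (p :: t :: ts) = (pvTrail (t :: ts)).map (· + 1) := by
          simp only [pvTrail]
          rw [if_neg (by exact_mod_cast hcnd)]
        rw [hT]
        simpa using ih

theorem pvTrail_spec (ps : List (Int × Int)) : ∀ k, pvTrail ps = some k →
    k < ps.length ∧ k + pvLead (ps.drop k) = ps.length
      ∧ ∀ j < k, j + pvLead (ps.drop j) ≠ ps.length := by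
  induction ps with
  | nil => intro k h; simp [pvTrail] at h
  | cons p tl ih =>
    intro k h
    by_cases hcnd : (pvCond p = true ∧ pvLead tl = tl.length)
    · have hT : pvTrail (p :: tl) = some 0 := by simp [pvTrail, hcnd.1, hcnd.2]
      rw [hT] at h
      cases h
      refine ⟨by simp, ?_, by omega⟩
      simp [pvLead, hcnd.1, hcnd.2]
    · have hT : pvTrail (p :: tl) = (pvTrail tl).map (· + 1) := by
        simp only [pvTrail]
        rw [if_neg (by exact_mod_cast hcnd)]
      rw [hT] at h
      cases htl : pvTrail tl with
      | none => rw [htl] at h; simp at h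
      | some k' =>
        rw [htl] at h
        simp at h
        obtain ⟨h1, h2, h3⟩ := ih k' htl
        subst h
        refine ⟨by simp; omega,
          by simp only [List.drop_succ_cons, List.length_cons]; omega, ?_⟩
        intro j hj
        cases j with
        | zero =>
          simp only [List.drop_zero, List.length_cons, Nat.zero_add]
          by_cases hc : pvCond p
          · have hne : ¬ pvLead tl = tl.length := fun he => hcnd ⟨hc, he⟩
            simp [pvLead, hc]
            exact hne
          · simp [pvLead, hc]
        | succ j' =>
          have := h3 j' (by omega)
          simp only [List.drop_succ_cons, List.length_cons]
          omega

theorem find?_range_eq (q : Nat → Bool) (m k : Nat) (hk : k < m) (hq : q k = true)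
    (hmin : ∀ j, j < k → q j = false) : (List.range m).find? q = some k := by
  have hsplit : List.range m = List.range k ++ List.range' k (m - k) := by
    rw [List.range_eq_range']
    have h2 : m = k + (m - k) := by omega
    conv_lhs => rw [h2]
    rw [← List.range'_append_1, List.range_eq_range']
    norm_num
  rw [hsplit, List.find?_append]
  have h1 : (List.range k).find? q = none := by
    rw [List.find?_eq_none]
    intro x hx
    simp [List.mem_range] at hx
    simp [hmin x hx]
  rw [h1]
  have h2 : m - k = (m - k - 1) + 1 := by omega
  rw [h2, List.range'_succ]
  simp [List.find?, hq]

theorem zeroRun_char (ps : List (Int × Int)) :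
    zeroRunLen ((pvRuns ps false).map (fun q : Nat × Nat => ((q.1 : Int), (q.2 : Int))))
      = if 0 < pvLead ps ∧ pvLead ps < ps.length then (pvLead ps : Int) else 0 := by
  have hshift : ∀ (L : List (Nat × Nat)),
      zeroRunLen ((L.map (fun q : Nat × Nat => (q.1 + 1, q.2))).map
          (fun q : Nat × Nat => ((q.1 : Int), (q.2 : Int)))) = 0 := by
    intro L
    unfold zeroRunLen
    rw [List.map_map]
    have : List.find? (fun r : Int × Int => r.1 == 0)
        (L.map ((fun q : Nat × Nat => ((q.1 : Int), (q.2 : Int)))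
            ∘ (fun q : Nat × Nat => (q.1 + 1, q.2)))) = none := by
      rw [List.find?_eq_none]
      intro x hx
      simp [List.mem_map] at hx
      obtain ⟨a, b, _, rfl⟩ := hx
      simp
      omega
    rw [this]
    rfl
  cases ps with
  | nil => simp [pvRuns, pvLead, zeroRunLen]
  | cons p tl =>
    by_cases hc : pvCond p
    · by_cases hlt : pvLead tl < tl.length
      · have hrun : pvRuns (p :: tl) false
            = (0, pvLead tl + 1) :: (pvRuns tl (pvCond p)).map (fun q => (q.1 + 1, q.2)) := by
          simp [pvRuns, hc, hlt]
        rw [hrun, List.map_cons]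
        unfold zeroRunLen
        rw [List.find?_cons_of_pos (by simp)]
        have : (0 < pvLead (p :: tl) ∧ pvLead (p :: tl) < (p :: tl).length) := by
          simp [pvLead, hc]
          omega
        rw [if_pos this]
        simp [pvLead, hc]
      · have hrun : pvRuns (p :: tl) false
            = (pvRuns tl (pvCond p)).map (fun q => (q.1 + 1, q.2)) := by
          simp only [pvRuns]
          rw [if_neg (by intro hx; exact hlt hx.2.2)]
          simp
        rw [hrun, hshift]
        rw [if_neg (by simp [pvLead, hc]; omega)]
    · have hrun : pvRuns (p :: tl) false
          = (pvRuns tl (pvCond p)).map (fun q => (q.1 + 1, q.2)) := by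
        simp only [pvRuns]
        rw [if_neg (by intro hx; exact (by simp [hc] : ¬ pvCond p = true) hx.1)]
        simp
      rw [hrun, hshift]
      rw [if_neg (by simp [pvLead, hc])]

theorem best_char (Z : List (Int × Int)) (m : Nat) (hm : Z.length = m) :
    ((PySem.List.pyRange 0 (m : Int) 1).filter (fun i =>
        decide (PySem.List.pyGetD (pvR Z) i 0 > 0
          ∧ (i = 0 ∨ PySem.List.pyGetD (pvR Z) (i - 1) 0 = 0)
          ∧ i + PySem.List.pyGetD (pvR Z) i 0 < (m : Int)))).foldl
      (fun (b : Int × Int) i =>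
        if PySem.List.pyGetD (pvR Z) i 0 > b.1
            ∨ PySem.List.pyGetD (pvR Z) i 0 = b.1 ∧ i > b.2
        then (PySem.List.pyGetD (pvR Z) i 0, i) else b) (0, -1)
    = Prod.swap (((pvRuns Z false).map
        (fun q : Nat × Nat => ((q.1 : Int), (q.2 : Int)))).foldl selStep (-1, 0)) := by
  subst hm
  rw [PySem.List.pyRange_zero_natCast, List.filter_map, List.foldl_map]
  have hpred : ∀ k ∈ List.range Z.length,
      ((fun i : Int => decide (PySem.List.pyGetD (pvR Z) i 0 > 0
          ∧ (i = 0 ∨ PySem.List.pyGetD (pvR Z) (i - 1) 0 = 0)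
          ∧ i + PySem.List.pyGetD (pvR Z) i 0 < (Z.length : Int))) ∘ (fun k : Nat => (k : Int))) k
        = pvQ Z false k := by
    intro k hk
    rw [List.mem_range] at hk
    simp only [Function.comp]
    unfold pvQ
    rw [decide_eq_decide]
    rw [PySem.List.pyGetD_natCast, pvR_getD]
    by_cases hk0 : k = 0
    · subst hk0
      simp
    · have hc1 : ((k : Int)) - 1 = ((k - 1 : Nat) : Int) := by omega
      rw [hc1, PySem.List.pyGetD_natCast, pvR_getD]
      have hk0' : ¬ ((k : Int) = 0) := by omega
      simp [hk0, hk0']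
      omega
  rw [List.filter_congr hpred]
  have hfold2 :
      ((List.range Z.length).filter (pvQ Z false)).foldl
        (fun (b : Int × Int) (k : Nat) =>
          if PySem.List.pyGetD (pvR Z) (k : Int) 0 > b.1
              ∨ PySem.List.pyGetD (pvR Z) (k : Int) 0 = b.1 ∧ (k : Int) > b.2
          then (PySem.List.pyGetD (pvR Z) (k : Int) 0, (k : Int)) else b) (0, -1)
      = ((((List.range Z.length).filter (pvQ Z false)).map
            (fun k => (k, pvLead (Z.drop k)))).map
            (fun q : Nat × Nat => ((q.2 : Int), (q.1 : Int)))).foldl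
          (fun b c => if c.1 > b.1 ∨ (c.1 = b.1 ∧ c.2 > b.2) then c else b) (0, -1) := by
    rw [List.map_map, List.foldl_map]
    apply PySem.List.foldl_congr_mem
    intro b k hk
    have hg : PySem.List.pyGetD (pvR Z) ((k : Nat) : Int) 0
        = ((pvLead (Z.drop k) : Nat) : Int) := by
      rw [PySem.List.pyGetD_natCast, pvR_getD]
    rw [hg]
    rfl
  rw [hfold2, candChar Z false]
  rw [sel_lex (pvRuns Z false) (-1) 0 (fun q hq => by omega) (pvRuns_pairwise Z false)]
  rw [Prod.swap_swap]

theorem B_eq_finalB (gas cost : List Int) (h : gas.length ≤ cost.length) :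
    findLongestGasGain_alt gas cost
      = finalB (gas.length : Int)
          ((PySem.List.enumerate (gas.zip cost) 0).foldl stepB ([], none)) := by
  have hm : (gas.zip cost).length = gas.length := by
    simp [List.length_zip]
    omega
  by_cases hm0 : gas.length = 0
  · have hZ : gas.zip cost = [] := by
      rw [← List.length_eq_zero_iff, hm, hm0]
    simp only [findLongestGasGain_alt]
    rw [hZ, hm0]
    decide
  · simp only [findLongestGasGain_alt]
    rw [buildRRev_eq, PySem.List.slice?_none_none_neg_one]
    simp only [Option.getD_some, List.reverse_reverse]
    rw [best_char (gas.zip cost) gas.length hm]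
    rw [(foldB_char (gas.zip cost) 0 []).1]
    simp only [List.nil_append, zero_add]
    have hg2 : PySem.List.pyGetD (pvR (gas.zip cost)) ((gas.length : Int) - 1) 0
        = ((pvLead ((gas.zip cost).drop (gas.length - 1)) : Nat) : Int) := by
      have hcast : ((gas.length : Int) - 1) = ((gas.length - 1 : Nat) : Int) := by omega
      rw [hcast, PySem.List.pyGetD_natCast, pvR_getD]
    rw [hg2]
    cases htr : pvTrail (gas.zip cost) with
    | none =>
      have hl0 : pvLead ((gas.zip cost).drop (gas.length - 1)) = 0 := by
        by_contra hpos
        have hiff := (pvTrail_isSome_iff (gas.zip cost)).2 (by rw [hm]; omega)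
        rw [htr] at hiff
        simp at hiff
      rw [hl0]
      rw [if_neg (by simp)]
      simp [finalB]
    | some k =>
      obtain ⟨hk1, hk2, hk3⟩ := pvTrail_spec (gas.zip cost) k htr
      rw [hm] at hk1 hk2 hk3
      have hpos : 0 < pvLead ((gas.zip cost).drop (gas.length - 1)) := by
        have hiff := (pvTrail_isSome_iff (gas.zip cost)).1 (by rw [htr]; rfl)
        rw [hm] at hiff
        exact hiff
      rw [if_pos ⟨by omega, by omega⟩]
      rw [PySem.List.pyRange_zero_natCast, List.find?_map]
      have hfind : (List.range gas.length).find?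
          ((fun i : Int => i + PySem.List.pyGetD (pvR (gas.zip cost)) i 0 == (gas.length : Int))
            ∘ (fun k : Nat => (k : Int))) = some k := by
        apply find?_range_eq _ _ _ hk1
        · simp only [Function.comp]
          rw [PySem.List.pyGetD_natCast, pvR_getD]
          simp only [beq_iff_eq]
          push_cast
          omega
        · intro j hj
          have hne := hk3 j hj
          simp only [Function.comp]
          rw [PySem.List.pyGetD_natCast, pvR_getD]
          simp only [beq_eq_false_iff_ne, ne_eq]
          push_cast
          omega
      rw [hfind]
      simp only [Option.map_some, Option.getD_some]
      rw [PySem.List.pyGetD_zero, pvR_getD]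
      simp only [List.drop_zero]
      have hstart : (if ((pvLead (gas.zip cost) : Nat) : Int) < (gas.length : Int)
            then ((pvLead (gas.zip cost) : Nat) : Int) else 0)
          = zeroRunLen ((pvRuns (gas.zip cost) false).map
              (fun q : Nat × Nat => ((q.1 : Int), (q.2 : Int)))) := by
        rw [zeroRun_char, hm]
        have hle := pvLead_le (gas.zip cost)
        rw [hm] at hle
        split_ifs <;> push_cast <;> omega
      rw [hstart]
      simp only [finalB, Option.map_some]
      rfl

-- ===== VERDICT (by name: the statement is the Claim_ definition above) =====
theorem findLongestGasGain_spec : Claim_equal_findLongestGasGain := by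
  intro gas cost _ hpre
  show findLongestGasGain gas cost = findLongestGasGain_alt gas cost
  rw [A_eq_finalB gas cost hpre, B_eq_finalB gas cost hpre]
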